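-- pv_equiv track=rewrite | github.com/jxu/op-reject-rule | src/106.py | certain_inequality
-- ===== SOURCE A (Python) =====
-- def certain_inequality(s1, pool, i, l):
--     if pool == []:
--         return True
--
--     for x in pool:
--         new_pool = pool[:]
--         new_pool.remove(x)
--
--         if x > s1[i]:
--             if certain_inequality(s1, new_pool, i+1, l + [x]):
--                 return True
--
--     return False
-- ===== SOURCE B (Python) =====
-- def _greedy(s1, spool, i):
--     # spool is sorted ascending; match each threshold s1[i], s1[i+1], ...
--     # with the smallest remaining element that beats it.
--     if not spool:
--         return True
--     t = s1[i]
--     for idx in range(len(spool)):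
--         if spool[idx] > t:
--             return _greedy(s1, spool[:idx] + spool[idx + 1:], i + 1)
--     return False
--
-- def certain_inequality(s1, pool, i, l):
--     return _greedy(s1, sorted(pool), i)
-- ===== Notes on version B (the rewrite author's own statement) =====
-- stated objective: alternative
-- what changed: Replaces A's backtracking search over all orderings of pool with sort-once greedy matching: pool is sorted and each threshold s1[i+k], read lazily as in A, is matched with the smallest remaining element that beats it.
import Mathlib
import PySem

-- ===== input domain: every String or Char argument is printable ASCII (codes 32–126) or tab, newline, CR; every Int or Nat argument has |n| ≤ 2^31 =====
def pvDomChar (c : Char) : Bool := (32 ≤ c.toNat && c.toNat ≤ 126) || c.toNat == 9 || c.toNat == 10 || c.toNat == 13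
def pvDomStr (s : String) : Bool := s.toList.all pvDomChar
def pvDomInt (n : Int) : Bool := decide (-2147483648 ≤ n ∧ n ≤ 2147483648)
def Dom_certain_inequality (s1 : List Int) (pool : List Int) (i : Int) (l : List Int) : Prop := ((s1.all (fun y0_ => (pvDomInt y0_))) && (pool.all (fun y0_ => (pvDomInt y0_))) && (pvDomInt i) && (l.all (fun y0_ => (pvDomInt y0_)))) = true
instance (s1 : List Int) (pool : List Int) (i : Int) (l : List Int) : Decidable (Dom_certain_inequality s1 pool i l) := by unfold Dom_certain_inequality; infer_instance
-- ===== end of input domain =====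

-- B replaces A's recursive backtracking search over all orderings of pool by sorting pool once and
-- greedily matching each threshold s1[i+k] (read lazily, like A) with the smallest remaining
-- element that beats it (objective: alternative algorithm).

-- ===== PORT A =====
def certain_inequality (s1 : List Int) (pool : List Int) (i : Int) (l : List Int) : Bool :=
  if h : pool = [] then true
  else
    pool.attach.any (fun x =>
      let new_pool := pool.erase x.1
      match PySem.List.pyGet? s1 i with
      | none => false            -- s1[i] raises IndexError in Python; such inputs are outside Pre_
      | some t => decide (x.1 > t) && certain_inequality s1 new_pool (i + 1) (l ++ [x.1]))
termination_by pool.length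
decreasing_by
  have h1 : 0 < pool.length := List.length_pos_of_ne_nil h
  have h2 : (pool.erase x.1).length = pool.length - 1 := List.length_erase_of_mem x.2
  omega

-- ===== PORT B =====
-- helper _greedy of Source B; spool[:idx] + spool[idx+1:] is take idx ++ drop (idx+1)
-- (exact for 0 ≤ idx < len spool by PySem.List.slice_to_natCast / slice_from_natCast)
def greedyB (s1 : List Int) (spool : List Int) (i : Int) : Bool :=
  if spool = [] then true
  else
    match PySem.List.pyGet? s1 i with
    | none => false              -- s1[i] raises IndexError in Python; such inputs are outside Pre_
    | some t =>
      match hf : spool.findIdx? (fun p => decide (t < p)) with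
      | none => false
      | some idx => greedyB s1 (spool.take idx ++ spool.drop (idx + 1)) (i + 1)
termination_by spool.length
decreasing_by
  obtain ⟨hlt, -, -⟩ := List.findIdx?_eq_some_iff_getElem.mp hf
  simp only [List.length_append, List.length_take, List.length_drop]
  omega

def certain_inequality_alt (s1 : List Int) (pool : List Int) (i : Int) (l : List Int) : Bool :=
  greedyB s1 (PySem.List.sorted pool (fun x => x)) i

-- ===== PRECONDITION & SPEC =====
-- Ingredients of Pre_ (also reused by B's correctness proof):
-- sortI sorts ascending; thr s1 i n lists the n thresholds s1[i..i+n-1] (0 where out of range);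
-- good P T says the sorted elements of P beat the sorted thresholds T pointwise;
-- pvMatchable s1 pool i k says SOME k-element sub-multiset of pool beats the first k thresholds
-- (a declarative matching condition; it never reads an out-of-range threshold when it holds
-- at the first out-of-range depth, since smaller depths are then in range).
def sortI (xs : List Int) : List Int := PySem.List.sorted xs (fun x => x)
def thr (s1 : List Int) (i : Int) (n : Nat) : List Int :=
  (List.range n).map (fun (k : Nat) => PySem.List.pyGetD s1 (i + (k : Int)) 0)
def good (P T : List Int) : Bool := ((sortI P).zip (sortI T)).all (fun pt => decide (pt.1 > pt.2))
def pvMatchable (s1 : List Int) (pool : List Int) (i : Int) (k : Nat) : Bool :=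
  pool.sublists.any (fun sub => decide (sub.length = k) && good sub (thr s1 i k))

-- Pre_ excludes exactly the inputs on which A raises IndexError: those where, for some k <
-- len(pool), k pool elements can beat the first k thresholds (so the search reaches depth k)
-- but index i+k is out of range for s1; B's greedy search raises there too.
def Pre_certain_inequality (s1 : List Int) (pool : List Int) (i : Int) (l : List Int) : Prop :=
  ∀ k : Nat, k < pool.length → pvMatchable s1 pool i k = true →
    PySem.Raise.InRange s1.length (i + (k : Int))
instance (s1 : List Int) (pool : List Int) (i : Int) (l : List Int) : Decidable (Pre_certain_inequality s1 pool i l) := by unfold Pre_certain_inequality; infer_instance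

def pvWitness_certain_inequality : List Int × List Int × Int × List Int := ([0, 5], [1, 7], 0, [])

def Spec_certain_inequality (s1 : List Int) (pool : List Int) (i : Int) (l : List Int) (out : Bool) : Prop := out = certain_inequality_alt s1 pool i l
instance (s1 : List Int) (pool : List Int) (i : Int) (l : List Int) (out : Bool) : Decidable (Spec_certain_inequality s1 pool i l out) := by unfold Spec_certain_inequality; infer_instance

-- ===== CLAIM (what is proved, stated in full; the proofs are below) =====
def Claim_equal_certain_inequality : Prop := ∀ (s1 : List Int) (pool : List Int) (i : Int) (l : List Int), Dom_certain_inequality s1 pool i l → Pre_certain_inequality s1 pool i l → Spec_certain_inequality s1 pool i l (certain_inequality s1 pool i l)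

-- ===== LEMMAS AND PROOFS =====

lemma sortI_perm (xs : List Int) : (sortI xs).Perm xs := PySem.List.sorted_perm xs (fun x => x) false

lemma sortI_pairwise (xs : List Int) : (sortI xs).Pairwise (· ≤ ·) :=
  PySem.List.sorted_pairwise xs (fun x => x)

lemma sortI_canon (xs ys : List Int) (h1 : ys.Perm xs) (h2 : ys.Pairwise (· ≤ ·)) : sortI xs = ys :=
  PySem.List.sorted_id_eq_of_perm_of_pairwise xs ys h1 h2

lemma sortI_length (xs : List Int) : (sortI xs).length = xs.length := (sortI_perm xs).length_eq

lemma pairwise_le_getElem (a : List Int) (ha : a.Pairwise (· ≤ ·)) (k m : Nat)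
    (hkm : k ≤ m) (hm : m < a.length) : a[k]'(by omega) ≤ a[m] := by
  rcases Nat.lt_or_ge k m with h | h
  · exact List.pairwise_iff_getElem.mp ha k m (by omega) hm h
  · have : k = m := by omega
    subst this; rfl

-- removing the element at index j is, up to permutation, removing one copy of the value a[j]
lemma eraseIdx_perm_erase (a : List Int) (j : Nat) (hj : j < a.length) :
    (a.eraseIdx j).Perm (a.erase (a[j])) := by
  have h1 : a.Perm (a[j] :: a.erase (a[j])) := List.perm_cons_erase (a.getElem_mem hj)
  have hsplit : a = a.take j ++ a[j] :: a.drop (j+1) := by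
    conv_lhs => rw [← List.take_append_drop j a, ← List.getElem_cons_drop hj]
  have h2 : a.Perm (a[j] :: a.eraseIdx j) := by
    rw [List.eraseIdx_eq_take_drop_succ]
    conv_lhs => rw [hsplit]
    exact List.perm_middle
  exact (h2.symm.trans h1).cons_inv

-- sorting after erasing a value = erasing that value's position from the sorted list
lemma sortI_erase (P : List Int) (x : Int) (q : Nat) (hq : q < (sortI P).length)
    (hx : (sortI P)[q] = x) : sortI (P.erase x) = (sortI P).eraseIdx q := by
  apply sortI_canon
  · have h1 : ((sortI P).eraseIdx q).Perm ((sortI P).erase x) := hx ▸ eraseIdx_perm_erase _ q hq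
    exact h1.trans ((sortI_perm P).erase x)
  · exact (sortI_pairwise P).sublist (List.eraseIdx_sublist _ q)

lemma good_iff (P T : List Int) : good P T = true ↔
    ∀ (k : Nat) (h1 : k < (sortI P).length) (h2 : k < (sortI T).length),
      (sortI T)[k] < (sortI P)[k] := by
  simp only [good, List.all_eq_true]
  constructor
  · intro h k h1 h2
    have hk : k < ((sortI P).zip (sortI T)).length := by
      rw [List.length_zip]; omega
    have := h _ (List.getElem_mem hk)
    simpa [List.getElem_zip] using this
  · rintro h pt hpt
    obtain ⟨k, hk, rfl⟩ := List.mem_iff_getElem.mp hpt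
    rw [List.length_zip] at hk
    simp only [List.getElem_zip]
    simp only [decide_eq_true_eq]
    exact h k (by omega) (by omega)

-- deleting matched positions preserves the pointwise domination (easy direction)
lemma idx_erase (a b : List Int) (n j : Nat) (ha : a.length = n + 1) (hb : b.length = n + 1)
    (hj : j ≤ n) (H : ∀ (k : Nat) (h1 : k < a.length) (h2 : k < b.length), b[k] < a[k]) :
    ∀ (k : Nat) (h1 : k < (a.eraseIdx j).length) (h2 : k < (b.eraseIdx j).length),
      (b.eraseIdx j)[k] < (a.eraseIdx j)[k] := by
  intro k h1 h2
  rw [List.length_eraseIdx_of_lt (by omega)] at h1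
  rw [List.getElem_eraseIdx, List.getElem_eraseIdx]
  split_ifs <;> exact H _ (by omega) (by omega)

-- the exchange direction: if after removing a[p] and b[j] (with b[j] < a[p]) the rest dominates
-- pointwise, then the full sorted lists dominate pointwise
lemma idx_restore (a b : List Int) (n p j : Nat) (ha : a.length = n + 1) (hb : b.length = n + 1)
    (hp : p ≤ n) (hj : j ≤ n) (hpa : a.Pairwise (· ≤ ·)) (hpb : b.Pairwise (· ≤ ·))
    (hx : b[j]'(by omega) < a[p]'(by omega))
    (H : ∀ (k : Nat) (h1 : k < (a.eraseIdx p).length) (h2 : k < (b.eraseIdx j).length),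
      (b.eraseIdx j)[k] < (a.eraseIdx p)[k]) :
    ∀ (k : Nat) (h1 : k < a.length) (h2 : k < b.length), b[k] < a[k] := by
  have hla : (a.eraseIdx p).length = n := by rw [List.length_eraseIdx_of_lt (by omega)]; omega
  have hlb : (b.eraseIdx j).length = n := by rw [List.length_eraseIdx_of_lt (by omega)]; omega
  have hE : ∀ (k : Nat) (hk : k < n),
      (b.eraseIdx j)[k]'(by omega) < (a.eraseIdx p)[k]'(by omega) := fun k hk =>
    H k (by omega) (by omega)
  have ea : ∀ (k : Nat) (hk : k < n), (a.eraseIdx p)[k]'(by omega) =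
      if k < p then a[k]'(by omega) else a[k+1]'(by omega) := by
    intro k hk; rw [List.getElem_eraseIdx]; split_ifs <;> rfl
  have eb : ∀ (k : Nat) (hk : k < n), (b.eraseIdx j)[k]'(by omega) =
      if k < j then b[k]'(by omega) else b[k+1]'(by omega) := by
    intro k hk; rw [List.getElem_eraseIdx]; split_ifs <;> rfl
  intro k h1 h2
  by_cases hc3 : p ≤ k ∧ k ≤ j
  · -- p ≤ k ≤ j : b[k] ≤ b[j] < a[p] ≤ a[k]
    have h3 : b[k] ≤ b[j]'(by omega) := pairwise_le_getElem b hpb k j (by omega) (by omega)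
    have h4 : a[p]'(by omega) ≤ a[k] := pairwise_le_getElem a hpa p k (by omega) (by omega)
    omega
  · by_cases hc1 : k < p ∧ k < j
    · -- untouched position
      have hkn : k < n := by omega
      have hthis := hE k hkn
      have e1 : (a.eraseIdx p)[k]'(by omega) = a[k] := by rw [ea k hkn, if_pos hc1.1]
      have e2 : (b.eraseIdx j)[k]'(by omega) = b[k] := by rw [eb k hkn, if_pos hc1.2]
      rw [e1, e2] at hthis
      exact hthis
    · by_cases hc2 : p < k ∧ j < k
      · -- both lists shifted down by one at k-1
        have hkn : k - 1 < n := by omega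
        have hthis := hE (k-1) hkn
        have e1 : (a.eraseIdx p)[k-1]'(by omega) = a[k] := by
          rw [ea (k-1) hkn, if_neg (by omega)]
          congr 1
          omega
        have e2 : (b.eraseIdx j)[k-1]'(by omega) = b[k] := by
          rw [eb (k-1) hkn, if_neg (by omega)]
          congr 1
          omega
        rw [e1, e2] at hthis
        exact hthis
      · -- remaining region: j ≤ k ≤ p with j < p
        have hjk : j ≤ k := by omega
        have hkp2 : k ≤ p := by omega
        rcases Nat.lt_or_ge k p with hlt | hge
        · -- j ≤ k < p : b[k] ≤ b[k+1] < a[k]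
          have hkn : k < n := by omega
          have hthis := hE k hkn
          have e1 : (a.eraseIdx p)[k]'(by omega) = a[k] := by rw [ea k hkn, if_pos hlt]
          have e2 : (b.eraseIdx j)[k]'(by omega) = b[k+1]'(by omega) := by
            rw [eb k hkn, if_neg (by omega)]
          rw [e1, e2] at hthis
          have hmono : b[k] ≤ b[k+1]'(by omega) :=
            pairwise_le_getElem b hpb k (k+1) (by omega) (by omega)
          omega
        · -- j < k = p : b[k] < a[k-1] ≤ a[k]
          have hjlt : j < k := by omega
          have hkn : k - 1 < n := by omega
          have hthis := hE (k-1) hkn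
          have e1 : (a.eraseIdx p)[k-1]'(by omega) = a[k-1]'(by omega) := by
            rw [ea (k-1) hkn, if_pos (by omega)]
          have e2 : (b.eraseIdx j)[k-1]'(by omega) = b[k] := by
            rw [eb (k-1) hkn, if_neg (by omega)]
            congr 1
            omega
          rw [e1, e2] at hthis
          have hmono : a[k-1]'(by omega) ≤ a[k] :=
            pairwise_le_getElem a hpa (k-1) k (by omega) (by omega)
          omega

-- the crux: one step of A's search = one step of the sorted matching criterion
lemma good_step (P T : List Int) (t : Int) (hlen : P.length = T.length + 1) :
    (∃ x ∈ P, t < x ∧ good (P.erase x) T = true) ↔ good P (t :: T) = true := by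
  have hlP : (sortI P).length = T.length + 1 := by rw [sortI_length]; omega
  have hlT : (sortI (t :: T)).length = T.length + 1 := by rw [sortI_length]; simp
  obtain ⟨j, hj, hjt⟩ := List.mem_iff_getElem.mp
    (((sortI_perm (t :: T)).mem_iff).mpr (List.mem_cons_self))
  have hTe : sortI T = (sortI (t :: T)).eraseIdx j := by
    apply sortI_canon
    · refine (eraseIdx_perm_erase _ j hj).trans ?_
      rw [hjt]
      exact (((sortI_perm (t :: T)).erase t).trans (by rw [List.erase_cons_head]))
    · exact (sortI_pairwise _).sublist (List.eraseIdx_sublist _ j)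
  constructor
  · rintro ⟨x, hxP, hxt, hgood⟩
    obtain ⟨q, hq, hqx⟩ := List.mem_iff_getElem.mp (((sortI_perm P).mem_iff).mpr hxP)
    have hPe : sortI (P.erase x) = (sortI P).eraseIdx q := sortI_erase P x q hq hqx
    rw [good_iff] at hgood ⊢
    rw [hPe, hTe] at hgood
    exact idx_restore (sortI P) (sortI (t :: T)) T.length q j hlP hlT (by omega) (by omega)
      (sortI_pairwise P) (sortI_pairwise (t :: T)) (by rw [hjt, hqx]; exact hxt) hgood
  · intro hg
    rw [good_iff] at hg
    have hq : j < (sortI P).length := by omega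
    refine ⟨(sortI P)[j], ((sortI_perm P).mem_iff).mp (List.getElem_mem hq), ?_, ?_⟩
    · have := hg j hq (by omega)
      rwa [hjt] at this
    · have hPe : sortI (P.erase ((sortI P)[j])) = (sortI P).eraseIdx j :=
        sortI_erase P _ j hq rfl
      rw [good_iff, hPe, hTe]
      exact idx_erase (sortI P) (sortI (t :: T)) T.length j hlP hlT (by omega) hg

lemma thr_succ (s1 : List Int) (i : Int) (m : Nat) :
    thr s1 i (m + 1) = PySem.List.pyGetD s1 i 0 :: thr s1 (i + 1) m := by
  unfold thr
  rw [List.range_succ_eq_map, List.map_cons, List.map_map]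
  congr 1
  · norm_num
  · apply List.map_congr_left
    intro k _
    show PySem.List.pyGetD s1 (i + ((k + 1 : Nat) : Int)) 0 = PySem.List.pyGetD s1 (i + 1 + (k : Int)) 0
    congr 1
    push_cast
    ring

lemma sortI_eq_of_perm (xs ys : List Int) (h : xs.Perm ys) : sortI xs = sortI ys :=
  sortI_canon xs (sortI ys) ((sortI_perm ys).trans h.symm) (sortI_pairwise ys)

lemma good_perm (P P' T : List Int) (h : P.Perm P') : good P T = good P' T := by
  unfold good
  rw [sortI_eq_of_perm P P' h]

lemma good_nil (T : List Int) : good [] T = true := by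
  simp [good, sortI, PySem.List.sorted]

lemma thr_length (s1 : List Int) (i : Int) (n : Nat) : (thr s1 i n).length = n := by
  simp [thr]

lemma matchable_zero (s1 : List Int) (pool : List Int) (i : Int) :
    pvMatchable s1 pool i 0 = true := by
  unfold pvMatchable
  rw [List.any_eq_true]
  exact ⟨[], List.mem_sublists.mpr (List.nil_sublist pool), by simp [good_nil]⟩

lemma pre_head (s1 pool : List Int) (i : Int) (l : List Int) (hne : pool ≠ [])
    (hpre : Pre_certain_inequality s1 pool i l) : PySem.Raise.InRange s1.length i := by
  have := hpre 0 (List.length_pos_of_ne_nil hne) (matchable_zero s1 pool i)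
  simpa using this

lemma pre_erase (s1 pool : List Int) (i : Int) (l l' : List Int) (x : Int) (hx : x ∈ pool)
    (t0 : Int) (ht0 : PySem.List.pyGet? s1 i = some t0) (hxt : t0 < x)
    (hpre : Pre_certain_inequality s1 pool i l) :
    Pre_certain_inequality s1 (pool.erase x) (i + 1) l' := by
  have ht0D : PySem.List.pyGetD s1 i 0 = t0 := by simp [PySem.List.pyGetD, ht0]
  intro k hk hm
  rw [List.length_erase_of_mem hx] at hk
  -- lift a matching of size k of pool.erase x (from i+1) to one of size k+1 of pool (from i)
  obtain ⟨sub, hsubmem, hsub⟩ := List.any_eq_true.mp hm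
  simp only [Bool.and_eq_true, decide_eq_true_eq] at hsub
  obtain ⟨hlen, hgood⟩ := hsub
  have hsp : (x :: sub).Subperm pool := by
    have h1 : (x :: sub).Subperm (x :: pool.erase x) :=
      (List.subperm_cons x).mpr (List.mem_sublists.mp hsubmem).subperm
    exact h1.trans (List.perm_cons_erase hx).symm.subperm
  obtain ⟨l2, hl2p, hl2s⟩ := hsp
  have hm' : pvMatchable s1 pool i (k + 1) = true := by
    unfold pvMatchable
    rw [List.any_eq_true]
    refine ⟨l2, List.mem_sublists.mpr hl2s, ?_⟩
    simp only [Bool.and_eq_true, decide_eq_true_eq]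
    refine ⟨by rw [hl2p.length_eq]; simp [hlen], ?_⟩
    rw [good_perm l2 (x :: sub) (thr s1 i (k+1)) hl2p, thr_succ, ht0D]
    refine (good_step (x :: sub) (thr s1 (i+1) k) t0 (by simp [hlen, thr_length])).mp ?_
    exact ⟨x, List.mem_cons_self, hxt, by rwa [List.erase_cons_head]⟩
  have := hpre (k + 1) (by omega) hm'
  rw [show (i + 1 + (k : Int)) = i + ((k + 1 : Nat) : Int) by push_cast; ring]
  exact this

lemma main_lemma (n : Nat) : ∀ (s1 pool : List Int) (i : Int) (l : List Int),
    pool.length = n → Pre_certain_inequality s1 pool i l →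
    certain_inequality s1 pool i l = good pool (thr s1 i n) := by
  induction n with
  | zero =>
    intro s1 pool i l hlen _
    have hnil : pool = [] := List.eq_nil_of_length_eq_zero hlen
    subst hnil
    rw [certain_inequality]
    simp [good, thr, sortI, PySem.List.sorted]
  | succ m ih =>
    intro s1 pool i l hlen hpre
    have hne : pool ≠ [] := by intro h; subst h; simp at hlen
    have hne2 : pool ≠ [] := by intro h; subst h; simp at hlen
    have h0 : PySem.Raise.InRange s1.length i := pre_head s1 pool i l hne2 hpre
    obtain ⟨t0, ht0⟩ : ∃ t, PySem.List.pyGet? s1 i = some t := by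
      cases hgl : PySem.List.pyGet? s1 i with
      | none => exact absurd h0 (by
          have := (PySem.List.pyGet?_eq_none_iff s1 i).mp hgl
          exact fun hh => this hh)
      | some t => exact ⟨t, rfl⟩
    have ht0D : PySem.List.pyGetD s1 i 0 = t0 := by
      simp [PySem.List.pyGetD, ht0]
    rw [certain_inequality, dif_neg hne, thr_succ, ht0D]
    rw [Bool.eq_iff_iff, List.any_eq_true]
    rw [← good_step pool (thr s1 (i + 1) m) t0 (by simp [thr, hlen])]
    constructor
    · rintro ⟨x, -, hfx⟩
      rw [ht0] at hfx
      simp only [Bool.and_eq_true, decide_eq_true_eq] at hfx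
      refine ⟨x.1, x.2, hfx.1, ?_⟩
      rw [← ih s1 (pool.erase x.1) (i + 1) (l ++ [x.1])
        (by rw [List.length_erase_of_mem x.2]; omega)
        (pre_erase s1 pool i l _ x.1 x.2 t0 ht0 hfx.1 hpre)]
      exact hfx.2
    · rintro ⟨x, hx, hxt, hgood⟩
      refine ⟨⟨x, hx⟩, List.mem_attach _ _, ?_⟩
      rw [ht0]
      simp only [Bool.and_eq_true, decide_eq_true_eq]
      refine ⟨hxt, ?_⟩
      rw [ih s1 (pool.erase x) (i + 1) (l ++ [x])
        (by rw [List.length_erase_of_mem hx]; omega)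
        (pre_erase s1 pool i l _ x hx t0 ht0 hxt hpre)]
      exact hgood

-- exchange for the greedy side: erasing an earlier (smaller) position of the sorted list
-- keeps the pointwise domination
lemma erase_exchange (P T : List Int) (idx q : Nat) (hq : q < (sortI P).length) (hle : idx ≤ q)
    (hg : good (P.erase ((sortI P)[q])) T = true) :
    good (P.erase ((sortI P)[idx]'(by omega))) T = true := by
  have hidx : idx < (sortI P).length := by omega
  rw [good_iff, sortI_erase P _ q hq rfl] at hg
  rw [good_iff, sortI_erase P _ idx hidx rfl]
  intro k h1 h2
  have h1' : k < ((sortI P).eraseIdx q).length := by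
    rw [List.length_eraseIdx_of_lt hq]
    rw [List.length_eraseIdx_of_lt hidx] at h1
    omega
  have hgk := hg k h1' h2
  have hmono : ((sortI P).eraseIdx q)[k]'h1' ≤ ((sortI P).eraseIdx idx)[k]'h1 := by
    rw [List.getElem_eraseIdx, List.getElem_eraseIdx]
    split_ifs with hk1 hk2 hk2
    · rfl
    · exact pairwise_le_getElem _ (sortI_pairwise P) k (k+1) (by omega) (by omega)
    · omega
    · rfl
  omega

-- greedy = the sorted matching criterion
lemma greedy_lemma (n : Nat) : ∀ (s1 pool : List Int) (i : Int) (l : List Int),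
    pool.length = n → Pre_certain_inequality s1 pool i l →
    greedyB s1 (sortI pool) i = good pool (thr s1 i n) := by
  induction n with
  | zero =>
    intro s1 pool i l hlen _
    have hnil : pool = [] := List.eq_nil_of_length_eq_zero hlen
    subst hnil
    rw [greedyB]
    simp [good, thr, sortI, PySem.List.sorted]
  | succ m ih =>
    intro s1 pool i l hlen hpre
    have hsne : sortI pool ≠ [] := by
      intro h
      have := sortI_length pool
      rw [h] at this
      simp [hlen] at this
    have hne2 : pool ≠ [] := by intro h; subst h; simp at hlen
    have h0 : PySem.Raise.InRange s1.length i := pre_head s1 pool i l hne2 hpre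
    obtain ⟨t0, ht0⟩ : ∃ t, PySem.List.pyGet? s1 i = some t := by
      cases hgl : PySem.List.pyGet? s1 i with
      | none => exact absurd h0 (by
          have := (PySem.List.pyGet?_eq_none_iff s1 i).mp hgl
          exact fun hh => this hh)
      | some t => exact ⟨t, rfl⟩
    have ht0D : PySem.List.pyGetD s1 i 0 = t0 := by
      simp [PySem.List.pyGetD, ht0]
    rw [greedyB, if_neg hsne, ht0, thr_succ, ht0D]
    have hstep := good_step pool (thr s1 (i + 1) m) t0 (by simp [thr, hlen])
    split
    next hbad => exact absurd hbad (by simp)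
    next t hsome =>
    cases hsome
    split
    next hf =>
      have hnone : ∀ x ∈ pool, ¬ t0 < x := by
        intro x hx
        have hxs : x ∈ sortI pool := ((sortI_perm pool).mem_iff).mpr hx
        have := List.findIdx?_eq_none_iff.mp hf x hxs
        simpa using this
      rw [Bool.eq_iff_iff]
      simp only [Bool.false_eq_true, false_iff]
      intro hgt
      obtain ⟨x, hx, hxt, -⟩ := hstep.mpr hgt
      exact hnone x hx hxt
    next idx hf =>
      obtain ⟨hlt, hpidx, hmin⟩ := List.findIdx?_eq_some_iff_getElem.mp hf
      simp only [decide_eq_true_eq] at hpidx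
      have hx : (sortI pool)[idx] ∈ pool :=
        ((sortI_perm pool).mem_iff).mp (List.getElem_mem hlt)
      have herase : (sortI pool).take idx ++ (sortI pool).drop (idx + 1)
          = sortI (pool.erase ((sortI pool)[idx])) := by
        rw [sortI_erase pool _ idx hlt rfl, List.eraseIdx_eq_take_drop_succ]
      rw [herase,
        ih s1 (pool.erase ((sortI pool)[idx])) (i + 1) l
          (by rw [List.length_erase_of_mem hx]; omega)
          (pre_erase s1 pool i l l _ hx t0 ht0 hpidx hpre)]
      rw [Bool.eq_iff_iff]
      constructor
      · intro hg
        exact hstep.mp ⟨_, hx, hpidx, hg⟩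
      · intro hg
        obtain ⟨y, hy, ht0y, hgy⟩ := hstep.mpr hg
        obtain ⟨q, hq, hqy⟩ := List.mem_iff_getElem.mp (((sortI_perm pool).mem_iff).mpr hy)
        have hle : idx ≤ q := by
          by_contra hcon
          have := hmin q (by omega)
          simp only [decide_eq_true_eq] at this
          rw [hqy] at this
          exact this ht0y
        exact erase_exchange pool (thr s1 (i + 1) m) idx q hq hle (by rw [hqy]; exact hgy)

-- ===== VERDICT (by name: the statement is the Claim_ definition above) =====
theorem certain_inequality_spec : Claim_equal_certain_inequality := by
  intro s1 pool i l _ hpre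
  show certain_inequality s1 pool i l = certain_inequality_alt s1 pool i l
  show certain_inequality s1 pool i l = greedyB s1 (sortI pool) i
  rw [main_lemma pool.length s1 pool i l rfl hpre,
    greedy_lemma pool.length s1 pool i l rfl hpre]
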